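-- pv_equiv track=rewrite | github.com/mjf1288/topstepx-futures-executor | export_backtest_data.py | get_contract_chain
-- ===== SOURCE A (Python) =====
-- QUARTERLY_MONTHS = ["H", "M", "U", "Z"]
--
-- def get_contract_chain(symbol: str, current_contract_id: str, num_prior: int = 2) -> list[str]:
--     """Build a list of contract IDs: [oldest_prior, ..., current].
--
--     Example: current = CON.F.US.MNQ.M26
--     Returns: [CON.F.US.MNQ.Z25, CON.F.US.MNQ.H26, CON.F.US.MNQ.M26]
--     """
--     parts = current_contract_id.split(".")
--     sym = parts[3]
--     month_code = parts[4][0]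
--     year_suffix = int(parts[4][1:])
--
--     idx = QUARTERLY_MONTHS.index(month_code)
--
--     contracts = []
--     for step in range(num_prior, 0, -1):
--         prior_idx = idx - step
--         prior_year = year_suffix
--         while prior_idx < 0:
--             prior_idx += 4
--             prior_year -= 1
--         prior_month = QUARTERLY_MONTHS[prior_idx]
--         contracts.append(f"CON.F.US.{sym}.{prior_month}{prior_year:02d}")
--
--     contracts.append(current_contract_id)
--     return contracts
-- ===== SOURCE B (Python) =====
-- QUARTERLY_MONTHS = ["H", "M", "U", "Z"]
--
-- def get_contract_chain(symbol: str, current_contract_id: str, num_prior: int = 2) -> list[str]: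
--     """Closed-form version: map each prior contract to an absolute quarter ordinal
--     total = year*4 + month_index and read month/year back with % and //."""
--     parts = current_contract_id.split(".")
--     sym = parts[3]
--     total = int(parts[4][1:]) * 4 + QUARTERLY_MONTHS.index(parts[4][0])
--     return [
--         f"CON.F.US.{sym}.{QUARTERLY_MONTHS[t % 4]}{t // 4:02d}"
--         for t in range(total - num_prior, total)
--     ] + [current_contract_id]
-- ===== Notes on version B (the rewrite author's own statement) =====
-- stated objective: faster
-- what changed: Replaces A's per-step negative-index while-loop renormalization with a single absolute quarter ordinal total = year*4 + month_index, reading month and year back with t % 4 and t // 4 over a forward range, built as one comprehension.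
import Mathlib
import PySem

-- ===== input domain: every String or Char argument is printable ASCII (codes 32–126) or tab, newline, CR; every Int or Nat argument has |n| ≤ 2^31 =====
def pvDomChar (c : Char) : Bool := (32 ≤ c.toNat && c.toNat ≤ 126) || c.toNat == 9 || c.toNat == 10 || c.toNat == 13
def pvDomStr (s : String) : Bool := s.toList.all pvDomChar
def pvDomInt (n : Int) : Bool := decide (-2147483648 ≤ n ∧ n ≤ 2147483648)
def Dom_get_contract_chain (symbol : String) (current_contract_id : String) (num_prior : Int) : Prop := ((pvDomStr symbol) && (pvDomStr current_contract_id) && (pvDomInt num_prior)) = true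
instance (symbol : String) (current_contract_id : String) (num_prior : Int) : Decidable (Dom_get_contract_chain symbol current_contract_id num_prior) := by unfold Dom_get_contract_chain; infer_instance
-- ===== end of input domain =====

-- B replaces A's per-step while-loop year/month renormalization with closed-form
-- arithmetic on an absolute quarter ordinal (t % 4, t // 4) over a forward range (objective: faster).


-- QUARTERLY_MONTHS (module-level constant shared by both Pythons; single-char strings ported as Char)
def pvMonths : List Char := ['H', 'M', 'U', 'Z']

-- ===== PORT A =====
-- A's inner 'while prior_idx < 0: prior_idx += 4; prior_year -= 1' loop, step for step
def pvRenorm (i y : Int) : Int × Int :=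
  if i < 0 then pvRenorm (i + 4) (y - 1) else (i, y)
termination_by (-i).toNat
decreasing_by omega

def get_contract_chain (symbol : String) (current_contract_id : String) (num_prior : Int) : List String :=
  let parts := (PySem.Str.split? current_contract_id ".").getD []
  let sym := (PySem.List.pyGet? parts 3).getD ""
  let p4 := (PySem.List.pyGet? parts 4).getD ""
  let month_code := (PySem.Str.pyGet? p4 0).getD ' '
  let year_suffix := (PySem.Int.ofStr? (PySem.Str.slice p4 (some 1) none)).getD 0
  let idx : Int := ((PySem.List.index? pvMonths month_code).getD 0 : Nat)
  let contracts := (PySem.List.pyRange num_prior 0 (-1)).foldl (fun acc step =>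
    let pr := pvRenorm (idx - step) year_suffix
    let prior_month := (PySem.List.pyGet? pvMonths pr.1).getD ' '
    acc ++ ["CON.F.US." ++ sym ++ "." ++ String.ofList [prior_month] ++
            PySem.Str.zfill (PySem.Int.toStr pr.2) 2]) []
  contracts ++ [current_contract_id]

-- ===== PORT B =====
def get_contract_chain_alt (symbol : String) (current_contract_id : String) (num_prior : Int) : List String :=
  let parts := (PySem.Str.split? current_contract_id ".").getD []
  let sym := (PySem.List.pyGet? parts 3).getD ""
  let p4 := (PySem.List.pyGet? parts 4).getD ""
  let total := ((PySem.Int.ofStr? (PySem.Str.slice p4 (some 1) none)).getD 0) * 4 +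
               (((PySem.List.index? pvMonths ((PySem.Str.pyGet? p4 0).getD ' ')).getD 0 : Nat) : Int)
  ((PySem.List.pyRange (total - num_prior) total 1).map (fun t =>
    "CON.F.US." ++ sym ++ "." ++
    String.ofList [(PySem.List.pyGet? pvMonths (PySem.Int.mod t 4)).getD ' '] ++
    PySem.Str.zfill (PySem.Int.toStr (PySem.Int.floordiv t 4)) 2))
  ++ [current_contract_id]

-- ===== PRECONDITION & SPEC =====
-- Pre_ excludes exactly the inputs where A raises: fewer than 5 dot parts (IndexError),
-- empty fifth part (IndexError), month code not in QUARTERLY_MONTHS (ValueError), or a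
-- year suffix int() rejects (ValueError).
def Pre_get_contract_chain (symbol : String) (current_contract_id : String) (num_prior : Int) : Prop :=
  5 ≤ ((PySem.Str.split? current_contract_id ".").getD []).length ∧
  ((PySem.List.pyGet? ((PySem.Str.split? current_contract_id ".").getD []) 4).getD "").toList ≠ [] ∧
  (PySem.Str.pyGet? ((PySem.List.pyGet? ((PySem.Str.split? current_contract_id ".").getD []) 4).getD "") 0).getD ' ' ∈ pvMonths ∧
  (PySem.Int.ofStr? (PySem.Str.slice ((PySem.List.pyGet? ((PySem.Str.split? current_contract_id ".").getD []) 4).getD "") (some 1) none)).isSome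
instance (symbol : String) (current_contract_id : String) (num_prior : Int) : Decidable (Pre_get_contract_chain symbol current_contract_id num_prior) := by unfold Pre_get_contract_chain; infer_instance

def pvWitness_get_contract_chain : String × String × Int := ("ES", "CON.F.US.ES.U07", 3)

def Spec_get_contract_chain (symbol : String) (current_contract_id : String) (num_prior : Int) (out : List String) : Prop := out = get_contract_chain_alt symbol current_contract_id num_prior
instance (symbol : String) (current_contract_id : String) (num_prior : Int) (out : List String) : Decidable (Spec_get_contract_chain symbol current_contract_id num_prior out) := by unfold Spec_get_contract_chain; infer_instance

-- ===== CLAIM (what is proved, stated in full; the proofs are below) =====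
def Claim_equal_get_contract_chain : Prop := ∀ (symbol : String) (current_contract_id : String) (num_prior : Int), Dom_get_contract_chain symbol current_contract_id num_prior → Pre_get_contract_chain symbol current_contract_id num_prior → Spec_get_contract_chain symbol current_contract_id num_prior (get_contract_chain symbol current_contract_id num_prior)

-- ===== LEMMAS AND PROOFS =====

-- A's while loop computes exactly floor-mod/div by 4 of the absolute ordinal 4*y + i.
theorem pvRenorm_eq (i y : Int) (h : i < 4) :
    pvRenorm i y = (PySem.Int.mod (4 * y + i) 4, PySem.Int.floordiv (4 * y + i) 4) := by
  induction i, y using pvRenorm.induct with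
  | case1 i y hi ih =>
    rw [pvRenorm, if_pos hi, ih (by omega)]
    congr 1 <;> · congr 1; ring
  | case2 i y hi =>
    rw [pvRenorm, if_neg hi]
    rw [PySem.Int.mod_eq_emod_of_pos (by omega : (0:Int) < 4),
        PySem.Int.floordiv_eq_ediv_of_pos (by omega : (0:Int) < 4)]
    have h1 : (4 * y + i) % 4 = i := by omega
    have h2 : (4 * y + i) / 4 = y := by omega
    rw [h1, h2]

-- a descending step range and the ascending ordinal range enumerate the same k's
theorem map_pyRange_countdown {α : Type} (f : Int → α) (n : Int) :
    (PySem.List.pyRange n 0 (-1)).map f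
      = (List.range n.toNat).map (fun k : Nat => f (n - (k : Int))) := by
  rw [PySem.List.pyRange_neg_one]
  simp [List.map_map, Function.comp]

theorem map_pyRange_window {α : Type} (f : Int → α) (n T : Int) :
    (PySem.List.pyRange (T - n) T 1).map f
      = (List.range n.toNat).map (fun k : Nat => f (T - n + (k : Int))) := by
  rw [PySem.List.pyRange_one]
  have h : (T - (T - n)).toNat = n.toNat := by omega
  rw [h, List.map_map]
  rfl

theorem chain_core (S : String) (I : Nat) (Y n : Int) (c : String) (hI : I ≤ 3) :
    (PySem.List.pyRange n 0 (-1)).foldl (fun acc step =>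
        acc ++ ["CON.F.US." ++ S ++ "." ++
          String.ofList [(PySem.List.pyGet? pvMonths (pvRenorm ((I : Int) - step) Y).1).getD ' '] ++
          PySem.Str.zfill (PySem.Int.toStr (pvRenorm ((I : Int) - step) Y).2) 2]) []
      ++ [c]
    = (PySem.List.pyRange (Y * 4 + (I : Int) - n) (Y * 4 + (I : Int)) 1).map (fun t =>
        "CON.F.US." ++ S ++ "." ++
        String.ofList [(PySem.List.pyGet? pvMonths (PySem.Int.mod t 4)).getD ' '] ++
        PySem.Str.zfill (PySem.Int.toStr (PySem.Int.floordiv t 4)) 2)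
      ++ [c] := by
  congr 1
  rw [PySem.List.foldl_append_singleton_eq_map, map_pyRange_countdown, map_pyRange_window]
  apply List.map_congr_left
  intro k hk
  rw [List.mem_range] at hk
  have hs1 : (1 : Int) ≤ n - (k : Int) := by omega
  rw [pvRenorm_eq ((I : Int) - (n - (k : Int))) Y (by omega)]
  have harg : 4 * Y + ((I : Int) - (n - (k : Int))) = Y * 4 + (I : Int) - n + (k : Int) := by ring
  rw [harg]

-- ===== VERDICT (by name: the statement is the Claim_ definition above) =====
theorem get_contract_chain_spec : Claim_equal_get_contract_chain := by
  intro symbol c n _ hpre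
  obtain ⟨hlen, hp4ne, hmem, hint⟩ := hpre
  unfold Spec_get_contract_chain get_contract_chain get_contract_chain_alt
  simp only []
  have hI : (PySem.List.index? pvMonths
      ((PySem.Str.pyGet? ((PySem.List.pyGet? ((PySem.Str.split? c ".").getD []) 4).getD "") 0).getD ' ')).getD 0 ≤ 3 := by
    simp only [pvMonths, List.mem_cons, List.not_mem_nil, or_false] at hmem
    rcases hmem with h | h | h | h <;> rw [h] <;> decide
  exact chain_core _ _ _ n c hI
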